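-- pv_equiv track=rewrite | github.com/fergusq/musikorpus-midi | postprocess.py | split_to_parts
-- ===== SOURCE A (Python) =====
-- def split_to_parts(bar: tuple[str]):
-- 	parts = {None: []}
-- 	part = None
-- 	for token in bar:
-- 		if token.startswith("part:"):
-- 			part = token
-- 			parts[part] = []
--
-- 		parts[part].append(token)
--
-- 	return {key: tuple(val) for key, val in parts.items()}
-- ===== SOURCE B (Python) =====
-- def split_to_parts(bar):
--     toks = list(bar)
--     n = len(toks)
--
--     def next_marker(i):
--         # first index j >= i with toks[j] a 'part:' marker (or n)
--         while i < n and not toks[i].startswith("part:"):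
--             i += 1
--         return i
--
--     b = next_marker(0)
--     result = {None: tuple(toks[:b])}
--     i = b
--     while i < n:
--         j = next_marker(i + 1)
--         result[toks[i]] = tuple(toks[i:j])
--         i = j
--     return result
-- ===== Notes on version B (the rewrite author's own statement) =====
-- stated objective: alternative
-- what changed: B replaces A's per-token dict mutation (reset-then-append under a tracked current part) by a two-phase segmentation: it scans for marker boundaries, slices the bar into a leading segment plus one contiguous segment per marker, and builds the dict with one insertion per segment (last segment for a repeated marker overwrites).
import Mathlib
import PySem

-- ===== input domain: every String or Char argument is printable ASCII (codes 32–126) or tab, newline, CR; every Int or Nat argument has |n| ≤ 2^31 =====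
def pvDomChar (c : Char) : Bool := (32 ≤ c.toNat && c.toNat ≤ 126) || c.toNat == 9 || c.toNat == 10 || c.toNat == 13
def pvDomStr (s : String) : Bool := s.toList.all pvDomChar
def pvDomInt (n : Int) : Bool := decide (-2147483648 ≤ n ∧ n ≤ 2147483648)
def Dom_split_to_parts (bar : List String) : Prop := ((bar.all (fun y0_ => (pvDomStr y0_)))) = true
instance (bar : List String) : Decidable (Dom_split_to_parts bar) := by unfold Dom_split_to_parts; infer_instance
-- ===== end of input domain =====

-- B re-implements A by slicing the bar into marker-delimited segments and inserting each segment
-- once, instead of A's per-token dict mutation; same cost, different decomposition (return value only).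

-- ===== PORT A =====
-- one loop iteration of A: maybe reset (part, parts[part]) on a marker, then append the token
def pvStepA (st : PySem.Dict (Option String) (List String) × Option String) (token : String) :
    PySem.Dict (Option String) (List String) × Option String :=
  let st' := if PySem.Str.startswith token "part:"
    then (st.1.insert (some token) ([] : List String), some token)
    else st
  (st'.1.modify st'.2 [] (fun l => l ++ [token]), st'.2)

def split_to_parts (bar : List String) : List (Option String × List String) :=
  -- parts = {None: []}; part = None; for token in bar: …  ; final comprehension keeps items as-is
  (bar.foldl pvStepA (PySem.Dict.empty.insert none ([] : List String), none)).1.items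

-- ===== PORT B =====
def pvMarker (t : String) : Bool := PySem.Str.startswith t "part:"

-- the while-loop of Source B: each marker starts a segment running to just before the next marker
-- (next_marker/toks[i:j] is expressed as takeWhile/dropWhile over the remaining suffix — same scan)
def pvSegs : List String → List (String × List String)
  | [] => []
  | t :: rest =>
      (t, t :: rest.takeWhile (fun x => !pvMarker x)) :: pvSegs (rest.dropWhile (fun x => !pvMarker x))
termination_by l => l.length
decreasing_by
  have := List.length_dropWhile_le (fun x => !pvMarker x) rest
  simp; omega

def split_to_parts_alt (bar : List String) : List (Option String × List String) :=
  let lead := bar.takeWhile (fun x => !pvMarker x)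
  let rest := bar.dropWhile (fun x => !pvMarker x)
  ((pvSegs rest).foldl (fun d p => d.insert (some p.1) p.2)
    (PySem.Dict.empty.insert none lead)).items

-- ===== PRECONDITION & SPEC =====
def Spec_split_to_parts (bar : List String) (out : List (Option String × List String)) : Prop := out = split_to_parts_alt bar
instance (bar : List String) (out : List (Option String × List String)) : Decidable (Spec_split_to_parts bar out) := by unfold Spec_split_to_parts; infer_instance

-- ===== CLAIM (what is proved, stated in full; the proofs are below) =====
def Claim_equal_split_to_parts : Prop := ∀ (bar : List String), Dom_split_to_parts bar → Spec_split_to_parts bar (split_to_parts bar)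

-- ===== LEMMAS AND PROOFS =====

-- appending one token to the entry just written at key k
theorem pv_modify_insert {d : PySem.Dict (Option String) (List String)} (k : Option String)
    (v : List String) (t : String) :
    (d.insert k v).modify k [] (fun l => l ++ [t]) = d.insert k (v ++ [t]) := by
  simp [PySem.Dict.modify, PySem.Dict.getD_insert_self, PySem.Dict.insert_insert_self]

-- A's fold, started just after writing (part ↦ v), equals B's segment fold
theorem pv_main (toks : List String) : ∀ (d : PySem.Dict (Option String) (List String))
    (part : Option String) (v : List String),
    (toks.foldl pvStepA (d.insert part v, part)).1 =
    (pvSegs (toks.dropWhile (fun x => !pvMarker x))).foldl (fun d p => d.insert (some p.1) p.2)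
      (d.insert part (v ++ toks.takeWhile (fun x => !pvMarker x))) := by
  induction toks with
  | nil => intro d part v; simp [pvSegs]
  | cons t rest ih =>
    intro d part v
    by_cases hm : pvMarker t = true
    · have hstep : pvStepA (d.insert part v, part) t = ((d.insert part v).insert (some t) [t], some t) := by
        simp only [pvStepA, pvMarker] at hm ⊢
        rw [if_pos hm]
        simpa using pv_modify_insert (d := d.insert part v) (some t) [] t
      simp only [List.foldl_cons, hstep]
      rw [ih (d.insert part v) (some t) [t]]
      conv_rhs => rw [pvSegs.eq_def]
      simp [List.takeWhile, List.dropWhile, hm]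
    · have hm' : PySem.Chars.startswith t.toList ['p','a','r','t',':'] = false := by
        simpa [pvMarker, PySem.Str.startswith] using hm
      have hstep : pvStepA (d.insert part v, part) t = (d.insert part (v ++ [t]), part) := by
        simp only [pvStepA, PySem.Str.startswith]
        rw [if_neg (by simp [hm'])]
        exact congrArg (fun x => (x, part)) (pv_modify_insert (d := d) part v t)
      simp only [List.foldl_cons, hstep]
      rw [ih d part (v ++ [t])]
      simp [pvMarker, PySem.Str.startswith, hm']

-- ===== VERDICT (by name: the statement is the Claim_ definition above) =====
theorem split_to_parts_spec : Claim_equal_split_to_parts := by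
  intro bar _
  show split_to_parts bar = split_to_parts_alt bar
  unfold split_to_parts split_to_parts_alt
  rw [pv_main bar PySem.Dict.empty none []]
  simp
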